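-- pv_equiv track=rewrite | github.com/roshanmsb/HIT-EC | emulator_bench/dataset_adapter.py | ec_prefixes
-- ===== SOURCE A (Python) =====
-- def ec_prefixes(label):
--     prefixes = []
--     parts = str(label).strip().split(".")
--     for part in parts[:4]:
--         normalized = part.strip()
--         if not normalized or normalized == "-" or normalized.lower().startswith("n"):
--             break
--         prefixes.append(".".join(parts[: len(prefixes) + 1]))
--     return prefixes
-- ===== SOURCE B (Python) =====
-- def ec_prefixes(label):
--     s = str(label).strip()
--     out = []
--     cur = ""   # characters of the part being read
--     acc = ""   # the prefix string emitted last (grown by concatenation)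
--     i = 0
--     n = len(s)
--     while True:
--         if i < n and s[i] != ".":
--             cur += s[i]
--             i += 1
--             continue
--         # part boundary (a '.' or the end of the string)
--         t = cur.strip()
--         if not t or t == "-" or t.lower().startswith("n"):
--             return out
--         acc = cur if not out else acc + "." + cur
--         out.append(acc)
--         if len(out) == 4 or i >= n:
--             return out
--         cur = ""
--         i += 1
-- ===== Notes on version B (the rewrite author's own statement) =====
-- stated objective: alternative
-- what changed: B never calls split: it scans the stripped string character by character in one pass, accumulating the current part and growing the emitted prefix by string concatenation, instead of A's split-into-parts loop that re-joins a slice of the parts list for every prefix.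
import Mathlib
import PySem

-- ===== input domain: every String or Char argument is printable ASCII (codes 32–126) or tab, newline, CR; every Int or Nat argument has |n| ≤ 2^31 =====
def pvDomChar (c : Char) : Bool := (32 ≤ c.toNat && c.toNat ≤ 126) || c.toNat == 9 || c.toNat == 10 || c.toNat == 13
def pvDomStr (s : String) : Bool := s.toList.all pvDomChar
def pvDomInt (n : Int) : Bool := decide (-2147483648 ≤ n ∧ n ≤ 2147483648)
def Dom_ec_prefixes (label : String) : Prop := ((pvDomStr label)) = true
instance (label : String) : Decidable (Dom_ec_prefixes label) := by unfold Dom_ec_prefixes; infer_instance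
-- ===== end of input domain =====

-- B replaces A's split-then-loop with a single character-level scan that never splits the
-- string: it accumulates the current part and grows the emitted prefix by concatenation.

-- ===== PORT A =====
-- the for-loop with break: state is the accumulated prefixes list
def ecA_loop (parts : List String) (rem : List String) (prefixes : List String) : List String :=
  match rem with
  | [] => prefixes
  | part :: rest =>
    let normalized := PySem.Str.strip part
    if normalized = "" ∨ normalized = "-" ∨ PySem.Str.startswith (PySem.Str.lower normalized) "n" = true then
      prefixes
    else
      ecA_loop parts rest (prefixes ++ [PySem.Str.join "." (PySem.List.slice parts none (some ((prefixes.length : Int) + 1)))])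

def ec_prefixes (label : String) : List String :=
  let parts := (PySem.Str.split? (PySem.Str.strip label) ".").getD []
  ecA_loop parts (PySem.List.slice parts none (some 4)) []

-- ===== PORT B =====
-- 'if not t or t == "-" or t.lower().startswith("n")' on the characters of the current part
def ecB_bad (cur : List Char) : Bool :=
  let t := PySem.Chars.strip cur
  t == [] || t == ['-'] || PySem.Chars.startswith (PySem.Chars.lower t) ['n']

-- the while loop of Source B: rem = remaining characters, cur = current part, acc = last prefix, out = results
def ecB_go (rem : List Char) (cur : List Char) (acc : List Char) (out : List String) : List String :=
  match rem with
  | c :: rest =>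
    if c ≠ '.' then
      ecB_go rest (cur ++ [c]) acc out
    else
      if ecB_bad cur then out
      else
        let acc' := if out.isEmpty then cur else acc ++ '.' :: cur
        let out' := out ++ [String.ofList acc']
        if out'.length = 4 then out' else ecB_go rest [] acc' out'
  | [] =>
    if ecB_bad cur then out
    else
      let acc' := if out.isEmpty then cur else acc ++ '.' :: cur
      out ++ [String.ofList acc']

def ec_prefixes_alt (label : String) : List String :=
  ecB_go (PySem.Str.strip label).toList [] [] []

-- ===== PRECONDITION & SPEC =====
def Spec_ec_prefixes (label : String) (out : List String) : Prop := out = ec_prefixes_alt label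
instance (label : String) (out : List String) : Decidable (Spec_ec_prefixes label out) := by unfold Spec_ec_prefixes; infer_instance

-- ===== CLAIM (what is proved, stated in full; the proofs are below) =====
def Claim_equal_ec_prefixes : Prop := ∀ (label : String), Dom_ec_prefixes label → Spec_ec_prefixes label (ec_prefixes label)

-- ===== LEMMAS AND PROOFS =====
-- A's break condition, as a Bool on a String
def ecBadS (p : String) : Bool :=
  let s := PySem.Str.strip p
  s == "" || s == "-" || PySem.Str.startswith (PySem.Str.lower s) "n"

-- splitting on '.' as a plain left-to-right recursion (cur kept in order)
def ecSp (l : List Char) (cur : List Char) : List (List Char) :=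
  match l with
  | [] => [cur]
  | c :: rest => if c = '.' then cur :: ecSp rest [] else ecSp rest (cur ++ [c])

-- common normal form: the prefixes produced from position k onward
def ecSpecGo (parts : List String) (rem : List String) (k : Nat) : List String :=
  match rem with
  | [] => []
  | p :: rest =>
    if ecBadS p then [] else PySem.Str.join "." (parts.take (k + 1)) :: ecSpecGo parts rest (k + 1)

theorem ecSplitOn_go_eq : ∀ (l : List Char) (fuel : Nat) (cur : List Char) (acc : List (List Char)),
    l.length ≤ fuel →
    PySem.Chars.splitOn.go ['.'] fuel l cur acc = acc.reverse ++ ecSp l cur.reverse := by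
  intro l
  induction l with
  | nil =>
    intro fuel cur acc h
    cases fuel <;> simp [PySem.Chars.splitOn.go, ecSp]
  | cons c rest ih =>
    intro fuel cur acc h
    match fuel with
    | 0 => simp at h
    | fuel + 1 =>
      by_cases hc : c = '.'
      · subst hc
        have hpre : List.isPrefixOf ['.'] ('.' :: rest) = true := by simp [List.isPrefixOf]
        simp only [PySem.Chars.splitOn.go, hpre, if_true, List.length_cons, List.length_nil,
          List.drop_succ_cons, List.drop_zero]
        rw [ih fuel [] (cur.reverse :: acc) (by simpa using Nat.le_of_succ_le_succ h)]
        simp [ecSp]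
      · have hpre : List.isPrefixOf ['.'] (c :: rest) = false := by
          simp [List.isPrefixOf]
          exact fun h' => hc h'.symm
        simp only [PySem.Chars.splitOn.go, hpre]
        rw [ih fuel (c :: cur) acc (by simpa using Nat.le_of_succ_le_succ h)]
        simp [ecSp, hc]

theorem ecSplitOn_dot (s : List Char) : PySem.Chars.splitOn s ['.'] = ecSp s [] := by
  rw [PySem.Chars.splitOn, ecSplitOn_go_eq s (s.length + 1) [] [] (by omega)]
  simp

theorem ecBadS_ofList (cs : List Char) : ecBadS (String.ofList cs) = ecB_bad cs := by
  have h1 : ∀ (s : String) (t : List Char), (s == String.ofList t) = (s.toList == t) := by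
    intro s t
    cases h : s.toList == t
    · simp only [beq_eq_false_iff_ne] at h
      simp only [beq_eq_false_iff_ne]
      intro hs; apply h; rw [hs]; simp
    · simp only [beq_iff_eq] at h ⊢
      apply String.toList_injective; simp [h]
  simp only [ecBadS, ecB_bad]
  rw [show ("" : String) = String.ofList [] by rfl, show ("-" : String) = String.ofList ['-'] by rfl]
  rw [h1, h1]
  simp [PySem.Str.startswith_eq]

theorem ecJoin_ofList (ps : List (List Char)) :
    String.ofList (PySem.Chars.join ['.'] ps) = PySem.Str.join "." (ps.map String.ofList) := by
  apply String.toList_injective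
  rw [PySem.Str.toList_join]
  simp [List.map_map, Function.comp_def]

theorem ecJoin_snoc (done : List (List Char)) (cur : List Char) :
    PySem.Chars.join ['.'] (done ++ [cur])
      = if done = [] then cur else PySem.Chars.join ['.'] done ++ '.' :: cur := by
  induction done with
  | nil => simp [PySem.Chars.join_singleton]
  | cons d ds ih =>
    cases ds with
    | nil => simp [PySem.Chars.join_cons_cons, PySem.Chars.join_singleton]
    | cons e es =>
      simp only [List.cons_append] at ih ⊢
      simp only [List.cons_ne_nil, if_false] at ih ⊢
      rw [PySem.Chars.join_cons_cons, PySem.Chars.join_cons_cons, ih]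
      simp

theorem ecA_loop_eq (parts : List String) (rem : List String) (prefixes : List String) :
    ecA_loop parts rem prefixes = prefixes ++ ecSpecGo parts rem prefixes.length := by
  induction rem generalizing prefixes with
  | nil => simp [ecA_loop, ecSpecGo]
  | cons p rest ih =>
    rw [ecA_loop]
    by_cases hb : ecBadS p = true
    · have hcond : PySem.Str.strip p = "" ∨ PySem.Str.strip p = "-" ∨
          PySem.Str.startswith (PySem.Str.lower (PySem.Str.strip p)) "n" = true := by
        simpa [ecBadS, decide_eq_true_eq, or_assoc] using hb
      rw [if_pos hcond, ecSpecGo]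
      simp [hb]
    · have hcond : ¬ (PySem.Str.strip p = "" ∨ PySem.Str.strip p = "-" ∨
          PySem.Str.startswith (PySem.Str.lower (PySem.Str.strip p)) "n" = true) := by
        intro h
        exact hb (by simpa [ecBadS, decide_eq_true_eq, or_assoc] using h)
      rw [if_neg hcond, ih]
      have hslice : PySem.List.slice parts none (some ((prefixes.length : Int) + 1))
          = parts.take (prefixes.length + 1) := by
        have h : ((prefixes.length : Int) + 1) = ((prefixes.length + 1 : Nat) : Int) := by push_cast; ring
        rw [h, PySem.List.slice_to_natCast]
      rw [ecSpecGo]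
      simp [hb, hslice]

theorem ecAccChar_eq (done : List (List Char)) (cur acc : List Char) (out : List String)
    (hlen : out.length = done.length) (hacc : done ≠ [] → acc = PySem.Chars.join ['.'] done) :
    (if out.isEmpty then cur else acc ++ '.' :: cur) = PySem.Chars.join ['.'] (done ++ [cur]) := by
  rw [ecJoin_snoc]
  by_cases hd : done = []
  · subst hd
    have : out = [] := List.length_eq_zero_iff.mp (by simpa using hlen)
    subst this
    simp
  · have hne : out ≠ [] := by
      intro h; subst h; exact hd (List.length_eq_zero_iff.mp hlen.symm)
    have hout : out.isEmpty = false := by simpa [List.isEmpty_iff] using hne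
    rw [if_neg hd, hout, hacc hd]
    simp

theorem ecAcc_eq (done : List (List Char)) (cur acc : List Char) (T : List (List Char)) (out : List String)
    (hlen : out.length = done.length) (hacc : done ≠ [] → acc = PySem.Chars.join ['.'] done) :
    String.ofList (if out.isEmpty then cur else acc ++ '.' :: cur)
      = PySem.Str.join "." (((done ++ cur :: T).map String.ofList).take (done.length + 1)) := by
  have htake : ((done ++ cur :: T).map String.ofList).take (done.length + 1)
      = (done ++ [cur]).map String.ofList := by
    rw [List.map_append]
    rw [show done.length + 1 = (done.map String.ofList).length + 1 by simp]
    rw [List.take_append]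
    simp
  rw [htake, ← ecJoin_ofList, ecAccChar_eq done cur acc out hlen hacc]

theorem ecB_go_eq : ∀ (rem cur : List Char) (done : List (List Char)) (acc : List Char) (out : List String),
    out.length = done.length → done.length < 4 →
    (done ≠ [] → acc = PySem.Chars.join ['.'] done) →
    ecB_go rem cur acc out =
      out ++ ecSpecGo ((done ++ ecSp rem cur).map String.ofList)
                      (((ecSp rem cur).map String.ofList).take (4 - done.length))
                      done.length := by
  intro rem
  induction rem with
  | nil =>
    intro cur done acc out hlen h4 hacc
    obtain ⟨m, hm⟩ : ∃ m, 4 - done.length = m + 1 := ⟨3 - done.length, by omega⟩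
    by_cases hb : ecB_bad cur = true
    · simp [ecB_go, ecSp, hb, hm, ecSpecGo, ecBadS_ofList]
    · simp only [ecB_go, ecSp, hb, if_false, Bool.false_eq_true, hm, List.map_cons, List.map_nil,
        List.take_succ_cons, List.take_nil, ecSpecGo, ecBadS_ofList]
      rw [ecAcc_eq done cur acc [] out hlen hacc]
  | cons c rest ih =>
    intro cur done acc out hlen h4 hacc
    by_cases hc : c = '.'
    case neg =>
      rw [ecB_go, if_pos hc]
      have hsp' : ecSp (c :: rest) cur = ecSp rest (cur ++ [c]) := by simp [ecSp, hc]
      rw [hsp']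
      exact ih (cur ++ [c]) done acc out hlen h4 hacc
    case pos =>
      subst hc
      have hsp : ecSp ('.' :: rest) cur = cur :: ecSp rest [] := by simp [ecSp]
      obtain ⟨m, hm⟩ : ∃ m, 4 - done.length = m + 1 := ⟨3 - done.length, by omega⟩
      have hm' : m = 4 - (done.length + 1) := by omega
      by_cases hb : ecB_bad cur = true
      · simp [ecB_go, hsp, hm, ecSpecGo, ecBadS_ofList, hb]
      · rw [ecB_go]
        simp only [ne_eq, not_true_eq_false, if_false, hb, Bool.false_eq_true, hsp,
          List.map_cons, hm, List.take_succ_cons, ecSpecGo, ecBadS_ofList, List.length_append,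
          List.length_cons, List.length_nil, hlen]
        by_cases h4' : done.length + 1 = 4
        · rw [if_pos h4']
          have hm0 : m = 0 := by omega
          subst hm0
          rw [ecAcc_eq done cur acc (ecSp rest []) out hlen hacc]
          simp [ecSpecGo, h4']
        · rw [if_neg h4']
          have hacc' : done ++ [cur] ≠ [] → (if out.isEmpty then cur else acc ++ '.' :: cur)
              = PySem.Chars.join ['.'] (done ++ [cur]) :=
            fun _ => ecAccChar_eq done cur acc out hlen hacc
          rw [ih [] (done ++ [cur]) _ (out ++ [String.ofList (if out.isEmpty then cur else acc ++ '.' :: cur)])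
            (by simp [hlen]) (by simp; omega) hacc']
          rw [ecAcc_eq done cur acc (ecSp rest []) out hlen hacc]
          simp only [List.length_append, List.length_cons, List.length_nil, List.append_assoc,
            List.cons_append, List.nil_append, hm']

-- ===== VERDICT (by name: the statement is the Claim_ definition above) =====
theorem ec_prefixes_spec : Claim_equal_ec_prefixes := by
  intro label _
  unfold Spec_ec_prefixes
  simp only [ec_prefixes, ec_prefixes_alt]
  have hparts : (PySem.Str.split? (PySem.Str.strip label) ".").getD []
      = (ecSp (PySem.Str.strip label).toList []).map String.ofList := by
    rw [PySem.Str.split?]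
    rw [show ("." : String).toList = ['.'] from rfl]
    simp [PySem.Chars.split?, ecSplitOn_dot]
  rw [hparts, ecA_loop_eq]
  rw [ecB_go_eq (PySem.Str.strip label).toList [] [] []
    [] rfl (by simp) (fun h => absurd rfl h)]
  have hslice : PySem.List.slice ((ecSp (PySem.Str.strip label).toList []).map String.ofList) none (some 4)
      = ((ecSp (PySem.Str.strip label).toList []).map String.ofList).take 4 := by
    rw [show (4:Int) = ((4:Nat):Int) by norm_num, PySem.List.slice_to_natCast]
  rw [hslice]
  simp
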